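-- pv_equiv track=rewrite | github.com/pypi-data/pypi-mirror-383 | packages/anytimes/anytimes-0.4.0.tar.gz/anytimes-0.4.0/anyqats/io/acis_sat_converter.py | _remove_entity_terminator
-- ===== SOURCE A (Python) =====
-- from typing import Any, Dict, Iterable, Iterator, List, Optional, Sequence, Set, Tuple, Union
--
-- def _remove_entity_terminator(tokens: List[str]) -> List[str]:
--     cleaned: List[str] = []
--     for token in tokens:
--         if token == "#":
--             break
--         if token.endswith("#"):
--             token = token[:-1]
--             if token:
--                 cleaned.append(token)
--             break
--         cleaned.append(token)
--     return cleaned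
-- ===== SOURCE B (Python) =====
-- def _remove_entity_terminator(tokens):
--     for i, token in enumerate(tokens):
--         if token.endswith("#"):
--             head = token[:-1]
--             return tokens[:i] + ([head] if head else [])
--     return list(tokens)
-- ===== Notes on version B (the rewrite author's own statement) =====
-- stated objective: simpler
-- what changed: Locates the first token ending in '#' by index and returns a single slice of the input plus the optional stripped token, instead of an element-by-element accumulator loop with two break branches.
import Mathlib
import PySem

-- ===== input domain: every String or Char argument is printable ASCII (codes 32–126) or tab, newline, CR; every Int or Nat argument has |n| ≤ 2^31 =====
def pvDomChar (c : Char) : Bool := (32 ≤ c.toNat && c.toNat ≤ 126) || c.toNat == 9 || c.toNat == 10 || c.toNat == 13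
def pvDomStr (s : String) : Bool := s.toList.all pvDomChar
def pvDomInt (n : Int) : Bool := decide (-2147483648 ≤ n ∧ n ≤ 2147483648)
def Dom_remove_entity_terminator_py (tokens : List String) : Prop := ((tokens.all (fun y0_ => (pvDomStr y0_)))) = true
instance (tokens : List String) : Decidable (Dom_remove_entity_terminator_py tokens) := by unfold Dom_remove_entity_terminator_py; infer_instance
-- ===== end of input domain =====

-- B replaces A's accumulator loop with a boundary-index scan plus one slice: simpler decomposition, same cost.


-- ===== PORT A =====
def remove_entity_terminator_py : List String → List String
  | [] => []
  | token :: rest =>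
    if token = "#" then []
    else if PySem.Str.endswith token "#" then
      let token' := PySem.Str.slice token none (some (-1))
      if token' = "" then [] else [token']
    else token :: remove_entity_terminator_py rest

-- ===== PORT B =====
-- B's enumerate loop: walk the remaining suffix with its running index i into `tokens`.
def pvAltGo (tokens : List String) : List String → Nat → List String
  | [], _ => tokens
  | token :: rest, i =>
    if PySem.Str.endswith token "#" then
      let head := PySem.Str.slice token none (some (-1))
      tokens.take i ++ (if head = "" then [] else [head])
    else pvAltGo tokens rest (i + 1)

def remove_entity_terminator_py_alt (tokens : List String) : List String :=
  pvAltGo tokens tokens 0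

-- ===== PRECONDITION & SPEC =====
def Spec_remove_entity_terminator_py (tokens : List String) (out : List String) : Prop := out = remove_entity_terminator_py_alt tokens
instance (tokens : List String) (out : List String) : Decidable (Spec_remove_entity_terminator_py tokens out) := by unfold Spec_remove_entity_terminator_py; infer_instance

-- ===== CLAIM (what is proved, stated in full; the proofs are below) =====
def Claim_equal_remove_entity_terminator_py : Prop := ∀ (tokens : List String), Dom_remove_entity_terminator_py tokens → Spec_remove_entity_terminator_py tokens (remove_entity_terminator_py tokens)

-- ===== LEMMAS AND PROOFS =====
lemma pvAltGo_eq (rest pre : List String) :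
    pvAltGo (pre ++ rest) rest pre.length = pre ++ remove_entity_terminator_py rest := by
  induction rest generalizing pre with
  | nil => simp [pvAltGo, remove_entity_terminator_py]
  | cons token rs ih =>
    by_cases he : PySem.Str.endswith token "#" = true
    · simp only [pvAltGo, remove_entity_terminator_py, he, if_true, List.take_left]
      by_cases hh : token = "#"
      · subst hh; simp only [if_true]
        have : PySem.Str.slice "#" none (some (-1)) = "" := by decide
        simp [this]
      · simp [hh]
    · have hne : token ≠ "#" := by rintro rfl; exact he (by decide)
      simp only [pvAltGo, remove_entity_terminator_py, he, if_false, hne]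
      have := ih (pre ++ [token])
      simpa using this

-- ===== VERDICT (by name: the statement is the Claim_ definition above) =====
theorem remove_entity_terminator_py_spec : Claim_equal_remove_entity_terminator_py := by
  intro tokens _
  show remove_entity_terminator_py tokens = remove_entity_terminator_py_alt tokens
  have := pvAltGo_eq tokens []
  simpa [remove_entity_terminator_py_alt] using this.symm
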